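-- pv_equiv track=rewrite | github.com/AndrewPetrouskiy/my_first_bot | main.py | paint_field
-- ===== SOURCE A (Python) =====
-- def paint_field(field: list) -> str:
--     txt = ''
--     for i in range(len(field)):
--         if not i % 3:
--             txt += f'\n{"." * 25}\n'
--         txt += f'{field[i]:^8}'
--     txt += f"\n{'.' * 25}"
--     return txt
-- ===== SOURCE B (Python) =====
-- def paint_field(field: list) -> str:
--     rows = [field[i:i + 3] for i in range(0, len(field), 3)]
--     parts = ['\n' + '.' * 25 + '\n' + ''.join(f'{x:^8}' for x in row)
--              for row in rows]
--     return ''.join(parts) + '\n' + '.' * 25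
-- ===== Notes on version B (the rewrite author's own statement) =====
-- stated objective: alternative
-- what changed: Replaces A's single index loop with a per-element modulo test deciding when to emit the row separator by a row-chunk traversal: the field is sliced into rows of three, each row is rendered as one separator plus the join of its centred cells, and the pieces are joined.
import Mathlib
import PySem

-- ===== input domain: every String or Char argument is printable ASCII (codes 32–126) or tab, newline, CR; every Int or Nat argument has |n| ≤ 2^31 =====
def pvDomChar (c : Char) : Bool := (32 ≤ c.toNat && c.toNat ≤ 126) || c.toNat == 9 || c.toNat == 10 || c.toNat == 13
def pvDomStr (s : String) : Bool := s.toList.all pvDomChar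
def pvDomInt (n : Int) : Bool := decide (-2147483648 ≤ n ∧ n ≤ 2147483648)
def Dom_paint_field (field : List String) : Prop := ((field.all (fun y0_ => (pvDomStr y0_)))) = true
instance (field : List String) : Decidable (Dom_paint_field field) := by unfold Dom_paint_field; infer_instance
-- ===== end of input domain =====

-- B replaces A's per-index loop with a modulo-controlled separator by a row-chunk
-- traversal (slices of three, one separator per row); objective: alternative decomposition.

-- shared formatting helpers: both Pythons use f'{x:^8}' and '.'*25
def pvSep25 : List Char := List.replicate 25 '.'

-- f'{x:^8}': Python centers with width 8, extra space on the RIGHT (left pad = gap//2)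
def pvCenter8 (cs : List Char) : List Char :=
  if 8 ≤ cs.length then cs
  else
    let gap := 8 - cs.length
    List.replicate (gap / 2) ' ' ++ cs ++ List.replicate (gap - gap / 2) ' '

-- ===== PORT A =====
def paint_field (field : List String) : String :=
  let txt : List Char :=
    (PySem.List.pyRange 0 (field.length : Int) 1).foldl
      (fun txt i =>
        let txt := if PySem.Int.mod i 3 = 0 then txt ++ '\n' :: pvSep25 ++ ['\n'] else txt
        txt ++ pvCenter8 (PySem.List.pyGetD field i "").toList)
      []
  String.ofList (txt ++ '\n' :: pvSep25)

-- ===== PORT B =====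
def paint_field_alt (field : List String) : String :=
  let rows := (PySem.List.pyRange 0 (field.length : Int) 3).map
    (fun i => PySem.List.slice field (some i) (some (i + 3)))
  let parts := rows.map
    (fun row => '\n' :: pvSep25 ++ '\n' :: row.flatMap (fun x => pvCenter8 x.toList))
  String.ofList (parts.flatten ++ '\n' :: pvSep25)

-- ===== PRECONDITION & SPEC =====
def Spec_paint_field (field : List String) (out : String) : Prop := out = paint_field_alt field
instance (field : List String) (out : String) : Decidable (Spec_paint_field field out) := by unfold Spec_paint_field; infer_instance

-- ===== CLAIM (what is proved, stated in full; the proofs are below) =====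
def Claim_equal_paint_field : Prop := ∀ (field : List String), Dom_paint_field field → Spec_paint_field field (paint_field field)

-- ===== LEMMAS AND PROOFS =====

-- canonical rendering: one row of up to three centred cells per separator
def renderRows : List String → List Char
  | [] => []
  | a :: rest =>
      ('\n' :: pvSep25 ++ '\n' :: ((a :: rest).take 3).flatMap (fun x => pvCenter8 x.toList))
        ++ renderRows (rest.drop 2)
  termination_by xs => xs.length
  decreasing_by simp

-- A's loop body, with the element paired to its index
def pvBodyA (txt : List Char) (p : Int × String) : List Char :=
  (if PySem.Int.mod p.1 3 = 0 then txt ++ '\n' :: pvSep25 ++ ['\n'] else txt)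
    ++ pvCenter8 p.2.toList

theorem renderRows_nil : renderRows [] = [] := by rw [renderRows.eq_def]

theorem renderRows_cons (a : String) (rest : List String) :
    renderRows (a :: rest)
      = ('\n' :: pvSep25 ++ '\n' :: ((a :: rest).take 3).flatMap (fun x => pvCenter8 x.toList))
        ++ renderRows (rest.drop 2) := by rw [renderRows.eq_def]

theorem pvFoldA_renderRows (xs : List String) (s : Int) (h3 : PySem.Int.mod s 3 = 0)
    (acc : List Char) :
    (PySem.List.enumerate xs s).foldl pvBodyA acc = acc ++ renderRows xs := by
  have hmod : s % 3 = 0 := by rwa [PySem.Int.mod_eq_emod_of_pos (by norm_num)] at h3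
  match xs with
  | [] => simp [PySem.List.enumerate_nil, renderRows_nil]
  | [a] =>
      simp only [PySem.List.enumerate_cons, PySem.List.enumerate_nil, List.foldl_cons,
        List.foldl_nil, pvBodyA]
      rw [if_pos h3, renderRows_cons]
      simp [renderRows_nil, List.append_assoc]
  | [a, b] =>
      have h1 : PySem.Int.mod (s + 1) 3 ≠ 0 := by
        rw [PySem.Int.mod_eq_emod_of_pos (by norm_num)]; omega
      simp only [PySem.List.enumerate_cons, PySem.List.enumerate_nil, List.foldl_cons,
        List.foldl_nil, pvBodyA]
      rw [if_pos h3, if_neg h1, renderRows_cons]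
      simp [renderRows_nil, List.append_assoc]
  | a :: b :: c :: rest =>
      have h1 : PySem.Int.mod (s + 1) 3 ≠ 0 := by
        rw [PySem.Int.mod_eq_emod_of_pos (by norm_num)]; omega
      have h2 : PySem.Int.mod (s + 1 + 1) 3 ≠ 0 := by
        rw [PySem.Int.mod_eq_emod_of_pos (by norm_num)]; omega
      have h3' : PySem.Int.mod (s + 1 + 1 + 1) 3 = 0 := by
        rw [PySem.Int.mod_eq_emod_of_pos (by norm_num)]; omega
      simp only [PySem.List.enumerate_cons, List.foldl_cons, pvBodyA]
      rw [if_pos h3, if_neg h1, if_neg h2,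
        pvFoldA_renderRows rest (s + 1 + 1 + 1) h3', renderRows_cons]
      simp [List.append_assoc]
  termination_by xs.length
  decreasing_by simp; omega

theorem pvRange3_cons (a b : Int) (h : a < b) :
    PySem.List.pyRange a b 3 = a :: PySem.List.pyRange (a + 3) b 3 := by
  rw [PySem.List.pyRange_of_pos a b (by norm_num), PySem.List.pyRange_of_pos (a+3) b (by norm_num)]
  have hN : (if a < b then ((b - a + 3 - 1) / 3).toNat else 0)
      = (if a + 3 < b then ((b - (a+3) + 3 - 1) / 3).toNat else 0) + 1 := by
    rw [if_pos h]
    by_cases h' : a + 3 < b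
    · rw [if_pos h']
      have : (b - a + 3 - 1) / 3 = (b - (a+3) + 3 - 1) / 3 + 1 := by omega
      rw [this]; omega
    · rw [if_neg h']
      have : (b - a + 3 - 1) / 3 = 1 := by omega
      rw [this]; rfl
  rw [hN, List.range_succ_eq_map]
  simp [List.map_map, Function.comp]
  intro k _
  ring

theorem pvRangeSlices_renderRows (field : List String) (j : Nat) :
    ((PySem.List.pyRange (j : Int) (field.length : Int) 3).map
        (fun i => PySem.List.slice field (some i) (some (i + 3)))).flatMap
      (fun row => '\n' :: pvSep25 ++ '\n' :: row.flatMap (fun x => pvCenter8 x.toList))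
      = renderRows (field.drop j) := by
  by_cases hj : j < field.length
  · rw [pvRange3_cons _ _ (by exact_mod_cast hj), List.map_cons, List.flatMap_cons]
    have hsl : PySem.List.slice field (some (j : Int)) (some ((j : Int) + 3))
        = (field.drop j).take 3 := by
      have h := PySem.List.slice_natCast_add field j 3
      simpa using h
    have hrec : ((PySem.List.pyRange ((j : Int) + 3) (field.length : Int) 3).map
        (fun i => PySem.List.slice field (some i) (some (i + 3)))).flatMap
        (fun row => '\n' :: pvSep25 ++ '\n' :: row.flatMap (fun x => pvCenter8 x.toList))
        = renderRows (field.drop (j + 3)) := by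
      have h := pvRangeSlices_renderRows field (j + 3)
      have hcast : ((j + 3 : Nat) : Int) = (j : Int) + 3 := by push_cast; ring
      rwa [hcast] at h
    rw [hsl, hrec]
    obtain ⟨a, rest, hrest⟩ : ∃ a rest, field.drop j = a :: rest := by
      cases hfd : field.drop j with
      | nil =>
          exfalso
          have := List.length_drop (l := field) (i := j)
          rw [hfd] at this; simp at this; omega
      | cons a rest => exact ⟨a, rest, rfl⟩
    have hd : field.drop (j + 3) = rest.drop 2 := by
      have : field.drop (j + 3) = (field.drop j).drop 3 := by
        rw [List.drop_drop]
      rw [this, hrest]; rfl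
    rw [hd, hrest, renderRows_cons]
  · have hnil : PySem.List.pyRange (j : Int) (field.length : Int) 3 = [] := by
      rw [PySem.List.pyRange_of_pos _ _ (by norm_num)]
      rw [if_neg (by exact_mod_cast hj)]
      simp
    rw [hnil, List.drop_of_length_le (by omega)]
    simp [renderRows_nil]
  termination_by field.length - j
  decreasing_by omega

-- ===== VERDICT (by name: the statement is the Claim_ definition above) =====
theorem paint_field_spec : Claim_equal_paint_field := by
  intro field _
  unfold Spec_paint_field paint_field paint_field_alt
  have hA : (PySem.List.pyRange 0 (field.length : Int) 1).foldl
      (fun txt i =>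
        let txt := if PySem.Int.mod i 3 = 0 then txt ++ '\n' :: pvSep25 ++ ['\n'] else txt
        txt ++ pvCenter8 (PySem.List.pyGetD field i "").toList)
      ([] : List Char)
      = (PySem.List.enumerate field 0).foldl pvBodyA [] := by
    rw [PySem.List.enumerate_eq_map_pyRange field "", List.foldl_map]
    simp [pvBodyA, PySem.List.len]
  have hB := pvRangeSlices_renderRows field 0
  simp only [Nat.cast_zero, List.drop_zero] at hB
  rw [hA, pvFoldA_renderRows field 0 (by decide) []]
  refine congrArg String.ofList ?_
  rw [List.nil_append, ← List.flatMap_def, hB]
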